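-- pv_equiv track=rewrite | github.com/nmtuan2007/echo-flux | engine/core/model_manager.py | _auto_detect_runtime
-- ===== SOURCE A (Python) =====
-- from typing import Dict, List, Any, Optional
--
-- def _auto_detect_runtime(files: List[str]) -> str:
--     """Detect runtime based on repository files."""
--     # CT2 strict check: must be at the root of the repository
--     has_model_bin = "model.bin" in files
--     has_config_json = "config.json" in files
--
--     has_onnx = any(f.endswith(".onnx") for f in files)
--     has_safetensors = any(f.endswith(".safetensors") for f in files)
--     has_pytorch_bin = any(f.endswith("pytorch_model.bin") for f in files)
--
--     if has_model_bin and has_config_json: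
--         return "ctranslate2"
--     elif has_onnx:
--         return "onnx"
--     elif has_safetensors or has_pytorch_bin:
--         return "transformers"
--
--     # Fallback to transformers if we can't tell
--     return "transformers"
-- ===== SOURCE B (Python) =====
-- from typing import List
--
-- def _auto_detect_runtime(files: List[str]) -> str:
--     # Single pass with a mutable state machine and early exit: classify each
--     # file once, return "ctranslate2" the moment both root files were seen.
--     mb = cj = onnx = False
--     for f in files:
--         if f == "model.bin":
--             mb = True
--         elif f == "config.json":
--             cj = True
--         elif f.endswith(".onnx"):
--             onnx = True
--         if mb and cj:
--             return "ctranslate2"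
--     return "onnx" if onnx else "transformers"
-- ===== Notes on version B (the rewrite author's own statement) =====
-- stated objective: alternative
-- what changed: B replaces A's five separate full scans plus a flag ladder by a single-pass state machine over the file list that classifies each file once into three flags and returns early as soon as both root files (model.bin, config.json) have been seen; the dead safetensors/pytorch scans disappear since their branch equals the fallback.
import Mathlib
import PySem

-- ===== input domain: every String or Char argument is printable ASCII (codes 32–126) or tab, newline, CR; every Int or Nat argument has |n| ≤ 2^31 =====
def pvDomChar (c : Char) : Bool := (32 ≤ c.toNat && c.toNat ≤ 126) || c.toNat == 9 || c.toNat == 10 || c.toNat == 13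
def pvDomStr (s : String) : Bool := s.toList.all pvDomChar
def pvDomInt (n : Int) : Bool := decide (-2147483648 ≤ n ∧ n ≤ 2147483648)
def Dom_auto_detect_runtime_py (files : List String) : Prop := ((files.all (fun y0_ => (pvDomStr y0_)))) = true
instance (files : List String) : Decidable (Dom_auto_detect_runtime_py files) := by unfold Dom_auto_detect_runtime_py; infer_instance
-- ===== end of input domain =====

-- B: single-pass state machine with early exit instead of A's five separate scans (alternative decomposition).


-- ===== PORT A =====
def auto_detect_runtime_py (files : List String) : String :=
  let has_model_bin := files.contains "model.bin"
  let has_config_json := files.contains "config.json"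
  let has_onnx := files.any (fun f => PySem.Str.endswith f ".onnx")
  let has_safetensors := files.any (fun f => PySem.Str.endswith f ".safetensors")
  let has_pytorch_bin := files.any (fun f => PySem.Str.endswith f "pytorch_model.bin")
  if has_model_bin && has_config_json then "ctranslate2"
  else if has_onnx then "onnx"
  else if has_safetensors || has_pytorch_bin then "transformers"
  else "transformers"

-- ===== PORT B =====
-- the loop of Source B: per-file classification into three flags, early return when both root files seen
def pvAltLoop (files : List String) (mb cj onnx : Bool) : String :=
  match files with
  | [] => if onnx then "onnx" else "transformers"
  | f :: rest =>
    let mb' := if f = "model.bin" then true else mb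
    let cj' := if f ≠ "model.bin" ∧ f = "config.json" then true else cj
    let onnx' := if f ≠ "model.bin" ∧ f ≠ "config.json" ∧ PySem.Str.endswith f ".onnx" then true else onnx
    if mb' && cj' then "ctranslate2" else pvAltLoop rest mb' cj' onnx'

def auto_detect_runtime_py_alt (files : List String) : String :=
  pvAltLoop files false false false

-- ===== PRECONDITION & SPEC =====
def Spec_auto_detect_runtime_py (files : List String) (out : String) : Prop := out = auto_detect_runtime_py_alt files
instance (files : List String) (out : String) : Decidable (Spec_auto_detect_runtime_py files out) := by unfold Spec_auto_detect_runtime_py; infer_instance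

-- ===== CLAIM (what is proved, stated in full; the proofs are below) =====
def Claim_equal_auto_detect_runtime_py : Prop := ∀ (files : List String), Dom_auto_detect_runtime_py files → Spec_auto_detect_runtime_py files (auto_detect_runtime_py files)

-- ===== LEMMAS AND PROOFS =====

-- the loop computes the same value as A's staged scans, for any starting flags
theorem pvAltLoop_eq (files : List String) : ∀ (mb cj onnx : Bool), ¬(mb = true ∧ cj = true) →
    pvAltLoop files mb cj onnx =
      if (mb || files.contains "model.bin") && (cj || files.contains "config.json") then "ctranslate2"
      else if onnx || files.any (fun f => PySem.Str.endswith f ".onnx") then "onnx"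
      else "transformers" := by
  induction files with
  | nil =>
    intro mb cj onnx h
    simp [pvAltLoop]
    intro hm hc
    exact absurd ⟨hm, hc⟩ h
  | cons f rest ih =>
    intro mb cj onnx h
    by_cases h1 : f = "model.bin"
    · subst h1
      have he : PySem.Chars.endswith ['m','o','d','e','l','.','b','i','n'] ['.','o','n','n','x'] = false := by decide
      by_cases hc : cj = true
      · simp_all [pvAltLoop]
      · have hcf : cj = false := by simp_all
        subst hcf
        show pvAltLoop rest true false onnx = _
        rw [ih true false onnx (by simp)]
        simp [he]
    · by_cases h2 : f = "config.json"
      · subst h2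
        have he : PySem.Chars.endswith ['c','o','n','f','i','g','.','j','s','o','n'] ['.','o','n','n','x'] = false := by decide
        by_cases hm : mb = true
        · simp_all [pvAltLoop]
        · have hmf : mb = false := by simp_all
          subst hmf
          show pvAltLoop rest false true onnx = _
          rw [ih false true onnx (by simp)]
          simp [he]
      · by_cases he : PySem.Str.endswith f ".onnx" = true
        · simp only [pvAltLoop, h1, h2, he, ne_eq, not_false_eq_true, true_and, and_true, if_false, if_true]
          rw [if_neg (by simp_all), ih mb cj true h]
          have h1' : ¬ "model.bin" = f := fun hh => h1 hh.symm
          have h2' : ¬ "config.json" = f := fun hh => h2 hh.symm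
          have he2 : PySem.Chars.endswith f.toList ['.','o','n','n','x'] = true := by
            simpa [PySem.Str.endswith] using he
          simp [h1', h2', he2]
        · simp only [pvAltLoop, h1, h2, he, ne_eq, not_false_eq_true, and_false, if_false, Bool.false_eq_true]
          rw [if_neg (by simp_all), ih mb cj onnx h]
          have h1' : ¬ "model.bin" = f := fun hh => h1 hh.symm
          have h2' : ¬ "config.json" = f := fun hh => h2 hh.symm
          have he2 : ¬ PySem.Chars.endswith f.toList ['.','o','n','n','x'] = true := by
            simpa [PySem.Str.endswith] using he
          simp [h1', h2', he2]

-- ===== VERDICT (by name: the statement is the Claim_ definition above) =====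
theorem auto_detect_runtime_py_spec : Claim_equal_auto_detect_runtime_py := by
  intro files _
  unfold Spec_auto_detect_runtime_py auto_detect_runtime_py auto_detect_runtime_py_alt
  rw [pvAltLoop_eq files false false false (by simp)]
  simp
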